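-- pv_equiv track=rewrite | github.com/nickweseman/leetcode | 2602-maximum-enemy-forts-that-can-be-captured/2602-maximum-enemy-forts-that-can-be-captured.py | captureForts
-- ===== SOURCE A (Python) =====
-- from typing import List
--
-- def captureForts(forts: List[int]) -> int:
--     current_index = 0
--     max_zeroes = 0
--     last_fort_index = -1
--
--     while current_index < len(forts):
--         if forts[current_index] in (1, -1):
--             if last_fort_index != -1 and forts[last_fort_index] * forts[current_index] == -1:
--                 max_zeroes = max(max_zeroes, current_index - last_fort_index - 1)
--             last_fort_index = current_index
--         current_index += 1
--     return max_zeroes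
-- ===== SOURCE B (Python) =====
-- from typing import List
--
-- def captureForts(forts: List[int]) -> int:
--     # Stage 1: run-length encode, mapping any non-fort value to key 0.
--     runs = []
--     cur_k, cur_c = 0, 0
--     for v in forts:
--         k = v if v in (1, -1) else 0
--         if k == cur_k:
--             cur_c += 1
--         else:
--             if cur_c:
--                 runs.append((cur_k, cur_c))
--             cur_k, cur_c = k, 1
--     if cur_c:
--         runs.append((cur_k, cur_c))
--     # Stage 2: a zero-run flanked by opposite forts is capturable; take the longest.
--     best = 0
--     for (a, _), (z, c), (b, _) in zip(runs, runs[1:], runs[2:]):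
--         if z == 0 and a * b == -1:
--             best = max(best, c)
--     return best
-- ===== Notes on version B (the rewrite author's own statement) =====
-- stated objective: alternative
-- what changed: Replaces A's single scan with a sentinel last-fort index by two staged passes: first run-length encode the list (non-fort values keyed 0), then slide a 3-run window over the runs list taking the longest zero-run flanked by opposite forts.
import Mathlib
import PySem

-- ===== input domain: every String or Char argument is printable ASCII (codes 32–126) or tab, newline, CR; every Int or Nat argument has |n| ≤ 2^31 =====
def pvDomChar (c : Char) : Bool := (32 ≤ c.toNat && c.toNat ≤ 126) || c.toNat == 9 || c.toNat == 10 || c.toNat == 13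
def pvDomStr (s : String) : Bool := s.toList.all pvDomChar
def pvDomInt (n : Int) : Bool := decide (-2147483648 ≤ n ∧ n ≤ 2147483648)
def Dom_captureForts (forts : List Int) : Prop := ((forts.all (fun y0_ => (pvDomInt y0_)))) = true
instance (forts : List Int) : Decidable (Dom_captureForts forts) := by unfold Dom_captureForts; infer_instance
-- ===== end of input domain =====

-- B replaces A's single scan with a sentinel last-fort index by two staged passes:
-- run-length encoding (non-forts keyed 0), then a sliding 3-window over the runs list.


-- ===== PORT A =====
-- while loop of A: fuel = number of remaining iterations (len - current_index)
def captureFortsGo (forts : List Int) (fuel : Nat) (ci mz lf : Int) : Int :=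
  match fuel with
  | 0 => mz
  | n + 1 =>
    let v := forts.getD ci.toNat 0
    if v = 1 ∨ v = -1 then
      let mz' := if lf ≠ -1 ∧ (forts.getD lf.toNat 0) * v = -1 then max mz (ci - lf - 1) else mz
      captureFortsGo forts n (ci + 1) mz' ci
    else
      captureFortsGo forts n (ci + 1) mz lf

def captureForts (forts : List Int) : Int :=
  captureFortsGo forts forts.length 0 0 (-1)

-- ===== PORT B =====
-- stage 1 of Source B: run-length encoding loop (state: runs so far, current key, current count)
def rleAlt (forts : List Int) : List (Int × Int) :=
  let st := forts.foldl
    (fun (st : List (Int × Int) × Int × Int) v =>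
      let k := if v = 1 ∨ v = -1 then v else 0
      if k = st.2.1 then (st.1, st.2.1, st.2.2 + 1)
      else ((if st.2.2 ≠ 0 then st.1 ++ [(st.2.1, st.2.2)] else st.1), k, 1))
    ([], 0, 0)
  st.1 ++ (if st.2.2 ≠ 0 then [(st.2.1, st.2.2)] else [])

-- stage 2 of Source B: zip(runs, runs[1:], runs[2:]) window pass
def captureForts_alt (forts : List Int) : Int :=
  let runs := rleAlt forts
  ((runs.zip runs.tail).zip runs.tail.tail).foldl
    (fun best p => if p.1.2.1 = 0 ∧ p.1.1.1 * p.2.1 = -1 then max best p.1.2.2 else best) 0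

-- ===== PRECONDITION & SPEC =====
def Spec_captureForts (forts : List Int) (out : Int) : Prop := out = captureForts_alt forts
instance (forts : List Int) (out : Int) : Decidable (Spec_captureForts forts out) := by unfold Spec_captureForts; infer_instance

-- ===== CLAIM (what is proved, stated in full; the proofs are below) =====
def Claim_equal_captureForts : Prop := ∀ (forts : List Int), Dom_captureForts forts → Spec_captureForts forts (captureForts forts)

-- ===== LEMMAS AND PROOFS =====

-- abstract middle form of A: structural recursion over the suffix, last fort as (index, value)
def absGo (suf : List Int) (ci mz : Int) (last : Option (Int × Int)) : Int :=
  match suf with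
  | [] => mz
  | v :: rest =>
    if v = 1 ∨ v = -1 then
      let mz' := match last with
        | some (li, lv) => if lv * v = -1 then max mz (ci - li - 1) else mz
        | none => mz
      absGo rest (ci + 1) mz' (some (ci, v))
    else
      absGo rest (ci + 1) mz last

-- counter form of A's scan: cnt = gap size since the last fort of value lv
def goCnt (lv : Int) (cnt best : Int) : List Int → Int
  | [] => best
  | v :: t =>
    if v = 1 ∨ v = -1 then
      goCnt v 0 (if lv * v = -1 then max best cnt else best) t
    else
      goCnt lv (cnt + 1) best t

def refScan (l : List Int) (mz : Int) : Int :=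
  match l with
  | [] => mz
  | v :: t => if v = 1 ∨ v = -1 then goCnt v 0 mz t else refScan t mz

-- structural (left-to-right) run-length grouping with pending run (k, c)
def grp (k c : Int) : List Int → List (Int × Int)
  | [] => if c ≠ 0 then [(k, c)] else []
  | v :: t =>
    let k' := if v = 1 ∨ v = -1 then v else 0
    if k' = k then grp k (c + 1) t
    else (if c ≠ 0 then [(k, c)] else []) ++ grp k' 1 t

-- the window fold of B, as a named function
def tfold (rs : List (Int × Int)) (best : Int) : Int :=
  ((rs.zip rs.tail).zip rs.tail.tail).foldl
    (fun best p => if p.1.2.1 = 0 ∧ p.1.1.1 * p.2.1 = -1 then max best p.1.2.2 else best) best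

lemma tfold_step (a z c : Int × Int) (t : List (Int × Int)) (b : Int) :
    tfold (a :: z :: c :: t) b
      = tfold (z :: c :: t) (if z.1 = 0 ∧ a.1 * c.1 = -1 then max b z.2 else b) := by
  simp [tfold, List.zip]

lemma tfold_head_count (k c c' : Int) (l : List (Int × Int)) (b : Int) :
    tfold ((k, c) :: l) b = tfold ((k, c') :: l) b := by
  match l with
  | [] => rfl
  | [z] => rfl
  | z :: w :: t => rw [tfold_step, tfold_step]

lemma tfold_drop (x z : Int × Int) (l : List (Int × Int)) (b : Int) (hz : z.1 ≠ 0) :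
    tfold (x :: z :: l) b = tfold (z :: l) b := by
  match l with
  | [] => rfl
  | w :: t => rw [tfold_step]; simp [hz]

lemma grp_head (l : List Int) : ∀ (k c : Int), 0 < c →
    ∃ m rs, grp k c l = (k, m) :: rs := by
  induction l with
  | nil => intro k c hc; exact ⟨c, [], by simp [grp, hc.ne']⟩
  | cons v t ih =>
    intro k c hc
    by_cases h : (if v = 1 ∨ v = -1 then v else 0) = k
    · simpa [grp, h] using ih k (c + 1) (by omega)
    · exact ⟨c, grp (if v = 1 ∨ v = -1 then v else 0) 1 t, by simp [grp, h, hc.ne']⟩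

-- a split nonzero head run folds the same as the merged one
lemma tfold_merge (v : Int) (hv : v = 1 ∨ v = -1) (t : List Int) :
    ∀ (c d e b : Int), 0 < d → 0 < e →
      tfold ((v, c) :: grp v e t) b = tfold (grp v d t) b := by
  induction t with
  | nil =>
    intro c d e b hd he
    simp [grp, hd.ne', he.ne', tfold]
  | cons w t ih =>
    intro c d e b hd he
    have hvz : v ≠ 0 := by rcases hv with h | h <;> simp [h]
    by_cases h : (if w = 1 ∨ w = -1 then w else 0) = v
    · simp only [grp, h, if_pos]
      exact ih c (d + 1) (e + 1) b (by omega) (by omega)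
    · simp only [grp, h, if_neg, he.ne', hd.ne', ne_eq, not_false_iff, ite_true,
        List.singleton_append]
      rw [tfold_drop _ _ _ _ (by exact hvz), tfold_head_count v e d]

lemma tfold_split (v : Int) (hv : v = 1 ∨ v = -1) (t : List Int) :
    ∀ (c d b : Int), 0 < d →
      tfold ((v, c) :: grp 0 0 t) b = tfold (grp v d t) b := by
  cases t with
  | nil =>
    intro c d b hd
    simp [grp, hd.ne', tfold]
  | cons w t =>
    intro c d b hd
    by_cases h : (if w = 1 ∨ w = -1 then w else 0) = v
    · have h1 : grp 0 0 (w :: t) = grp v 1 t := by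
        have hvz : v ≠ 0 := by rcases hv with h' | h' <;> simp [h']
        simp [grp, h, hvz]
      have h2 : grp v d (w :: t) = grp v (d + 1) t := by simp [grp, h]
      rw [h1, h2]
      exact tfold_merge v hv t c (d + 1) 1 b (by omega) one_pos
    · have h1 : grp 0 0 (w :: t) = grp (if w = 1 ∨ w = -1 then w else 0) 1 t := by
        by_cases hz : (if w = 1 ∨ w = -1 then w else 0) = 0
        · simp [grp, hz]
        · simp [grp, hz]
      have h2 : grp v d (w :: t)
          = (v, d) :: grp (if w = 1 ∨ w = -1 then w else 0) 1 t := by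
        simp [grp, h, hd.ne']
      rw [h1, h2, tfold_head_count v c d]

-- B-side main lemma: the counter scan equals the window fold over the grouped rest
lemma goCnt_eq_tfold (rest : List Int) :
    ∀ (lv cnt best : Int), (lv = 1 ∨ lv = -1) → 0 ≤ best →
      goCnt lv cnt best rest = tfold ((lv, 1) :: grp 0 cnt rest) best := by
  induction rest with
  | nil =>
    intro lv cnt best _ _
    by_cases hc : cnt = 0 <;> simp [goCnt, grp, hc, tfold]
  | cons w t ih =>
    intro lv cnt best hlv hb
    by_cases hw : w = 1 ∨ w = -1
    · have hwz : w ≠ 0 := by rcases hw with h | h <;> simp [h]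
      obtain ⟨m, rs, hrs⟩ := grp_head t w 1 one_pos
      have hbest' : goCnt w 0 (if lv * w = -1 then max best cnt else best) t
          = tfold (grp w 1 t) (if lv * w = -1 then max best cnt else best) := by
        rw [ih w 0 _ hw (by positivity), tfold_split w hw t 1 1 _ one_pos]
      by_cases hc : cnt = 0
      · have hmax : (if lv * w = -1 then max best cnt else best) = best := by
          subst hc; simp [max_eq_left hb]
        have h1 : grp 0 cnt (w :: t) = grp w 1 t := by
          simp [grp, hw, hwz, hc]
        rw [h1, hrs, tfold_drop _ _ _ _ (by exact hwz), ← hrs]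
        simp only [goCnt, hw, if_pos, hmax]
        rw [hmax] at hbest'
        exact hbest'
      · have h1 : grp 0 cnt (w :: t) = (0, cnt) :: grp w 1 t := by
          simp [grp, hw, hwz, hc]
        rw [h1, hrs, tfold_step, tfold_drop _ _ _ _ (by exact hwz), ← hrs]
        simp only [goCnt, hw, if_pos]
        rw [hbest']
        congr 1
        simp
    · have h1 : grp 0 cnt (w :: t) = grp 0 (cnt + 1) t := by simp [grp, hw]
      simp only [goCnt, hw, ite_false]
      rw [ih lv (cnt + 1) best hlv hb, h1]

lemma refScan_eq_tfold (l : List Int) :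
    ∀ (c mz : Int), 0 ≤ mz → refScan l mz = tfold (grp 0 c l) mz := by
  induction l with
  | nil =>
    intro c mz _
    by_cases hc : c = 0 <;> simp [refScan, grp, hc, tfold]
  | cons w t ih =>
    intro c mz hmz
    by_cases hw : w = 1 ∨ w = -1
    · have hwz : w ≠ 0 := by rcases hw with h | h <;> simp [h]
      have hgo : goCnt w 0 mz t = tfold (grp w 1 t) mz := by
        rw [goCnt_eq_tfold t w 0 mz hw hmz, tfold_split w hw t 1 1 _ one_pos]
      obtain ⟨m, rs, hrs⟩ := grp_head t w 1 one_pos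
      by_cases hc : c = 0
      · have h1 : grp 0 c (w :: t) = grp w 1 t := by simp [grp, hw, hwz, hc]
        simp only [refScan, hw, if_pos]
        rw [hgo, h1]
      · have h1 : grp 0 c (w :: t) = (0, c) :: grp w 1 t := by
          simp [grp, hw, hwz, hc]
        simp only [refScan, hw, if_pos]
        rw [hgo, h1, hrs, tfold_drop _ _ _ _ (by exact hwz)]
    · have h1 : grp 0 c (w :: t) = grp 0 (c + 1) t := by simp [grp, hw]
      simp only [refScan, hw, ite_false]
      rw [ih (c + 1) mz hmz, h1]

-- A-side: indexed abstract loop equals the counter form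
lemma absGo_some_eq_goCnt (t : List Int) :
    ∀ (ci mz li lv : Int),
      absGo t ci mz (some (li, lv)) = goCnt lv (ci - li - 1) mz t := by
  induction t with
  | nil => intro ci mz li lv; rfl
  | cons v t ih =>
    intro ci mz li lv
    by_cases hv : v = 1 ∨ v = -1
    · simp only [absGo, goCnt, hv, if_pos]
      rw [ih (ci + 1) _ ci v]
      norm_num
    · simp only [absGo, goCnt, hv, ite_false]
      rw [ih (ci + 1) mz li lv]
      congr 1
      ring
lemma absGo_none_eq_refScan (l : List Int) :
    ∀ (ci mz : Int), absGo l ci mz none = refScan l mz := by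
  induction l with
  | nil => intro ci mz; rfl
  | cons v t ih =>
    intro ci mz
    by_cases hv : v = 1 ∨ v = -1
    · simp only [absGo, refScan, hv, if_pos]
      rw [absGo_some_eq_goCnt t (ci + 1) mz ci v]
      norm_num
    · simp only [absGo, refScan, hv, ite_false]
      exact ih (ci + 1) mz

-- bridge: A's indexed fuel loop equals the abstract suffix recursion
lemma captureFortsGo_eq_absGo (suf : List Int) :
    ∀ (pre : List Int) (mz lf : Int) (last : Option (Int × Int)),
      ((lf = -1 ∧ last = none) ∨
        (∃ li lv, last = some (li, lv) ∧ lf = li ∧ 0 ≤ li ∧ li.toNat < pre.length ∧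
          (pre ++ suf).getD li.toNat 0 = lv)) →
      captureFortsGo (pre ++ suf) suf.length (pre.length : Int) mz lf
        = absGo suf (pre.length : Int) mz last := by
  induction suf with
  | nil => intro pre mz lf last _; simp [captureFortsGo, absGo]
  | cons v rest ih =>
    intro pre mz lf last hinv
    have hgetv : (pre ++ v :: rest).getD ((pre.length : Int)).toNat 0 = v := by
      simp [List.getD_eq_getElem?_getD]
    have hassoc : pre ++ v :: rest = (pre ++ [v]) ++ rest := by simp
    have hlen : ((pre ++ [v]).length : Int) = (pre.length : Int) + 1 := by
      simp
    by_cases hv : v = 1 ∨ v = -1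
    · -- fort element
      have hinv' : (∃ li lv, (some ((pre.length : Int), v) : Option (Int × Int)) = some (li, lv) ∧
          (pre.length : Int) = li ∧ 0 ≤ li ∧ li.toNat < (pre ++ [v]).length ∧
          ((pre ++ [v]) ++ rest).getD li.toNat 0 = lv) :=
        ⟨(pre.length : Int), v, rfl, rfl, by positivity, by simp,
          by rw [← hassoc]; exact hgetv⟩
      rcases hinv with ⟨hlf, hlast⟩ | ⟨li, lv, hlast, hlf, hli0, hlilt, hval⟩
      · subst hlf hlast
        have hrec := ih (pre ++ [v]) mz (pre.length : Int)
          (some ((pre.length : Int), v)) (Or.inr hinv')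
        rw [hassoc]
        simp only [List.length_cons, captureFortsGo, absGo, hlen] at hrec ⊢
        rw [hassoc] at hgetv
        simpa [hgetv, hv] using hrec
      · subst hlast
        have hne : lf ≠ -1 := by omega
        have hlookup : ((pre ++ [v]) ++ rest).getD lf.toNat 0 = lv := by
          rw [← hassoc, hlf]; exact hval
        have hrec := ih (pre ++ [v])
          (if lv * v = -1 then max mz ((pre.length : Int) - li - 1) else mz)
          (pre.length : Int) (some ((pre.length : Int), v)) (Or.inr hinv')
        rw [hassoc]
        simp only [List.length_cons, captureFortsGo, absGo, hlen] at hrec ⊢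
        rw [hassoc] at hgetv
        have hli : ¬ li = -1 := by omega
        have hval2 : (pre ++ v :: rest)[li.toNat]?.getD 0 = lv := by
          simpa [List.getD_eq_getElem?_getD] using hval
        simpa [hgetv, hv, hne, hlookup, hlf, hli, hval2] using hrec
    · -- non-fort element
      have hinv' : ((lf = -1 ∧ last = none) ∨
          (∃ li lv, last = some (li, lv) ∧ lf = li ∧ 0 ≤ li ∧ li.toNat < (pre ++ [v]).length ∧
            ((pre ++ [v]) ++ rest).getD li.toNat 0 = lv)) := by
        rcases hinv with h | ⟨li, lv, h1, h2, h3, h4, h5⟩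
        · exact Or.inl h
        · exact Or.inr ⟨li, lv, h1, h2, h3, by simp; omega, by rw [← hassoc]; exact h5⟩
      have hrec := ih (pre ++ [v]) mz lf last hinv'
      rw [hassoc]
      simp only [List.length_cons, captureFortsGo, absGo, hlen] at hrec ⊢
      rw [hassoc] at hgetv
      simpa [hgetv, hv] using hrec

-- B's stage-1 fold equals the structural grouping
lemma rleAlt_fold_eq_grp (l : List Int) :
    ∀ (rs : List (Int × Int)) (k c : Int),
      (let st := l.foldl
        (fun (st : List (Int × Int) × Int × Int) v =>
          let k := if v = 1 ∨ v = -1 then v else 0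
          if k = st.2.1 then (st.1, st.2.1, st.2.2 + 1)
          else ((if st.2.2 ≠ 0 then st.1 ++ [(st.2.1, st.2.2)] else st.1), k, 1))
        (rs, k, c)
       st.1 ++ (if st.2.2 ≠ 0 then [(st.2.1, st.2.2)] else [])) = rs ++ grp k c l := by
  induction l with
  | nil =>
    intro rs k c
    by_cases hc : c = 0 <;> simp [grp, hc]
  | cons v t ih =>
    intro rs k c
    by_cases h : (if v = 1 ∨ v = -1 then v else 0) = k
    · simpa [grp, h] using ih rs k (c + 1)
    · by_cases hc : c = 0
      · simpa [grp, h, hc] using ih rs (if v = 1 ∨ v = -1 then v else 0) 1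
      · simpa [grp, h, hc] using
          ih (rs ++ [(k, c)]) (if v = 1 ∨ v = -1 then v else 0) 1

lemma rleAlt_eq_grp (forts : List Int) : rleAlt forts = grp 0 0 forts := by
  have h := rleAlt_fold_eq_grp forts [] 0 0
  simp only [List.nil_append] at h
  simpa [rleAlt] using h

-- ===== VERDICT (by name: the statement is the Claim_ definition above) =====
theorem captureForts_spec : Claim_equal_captureForts := by
  intro forts _
  unfold Spec_captureForts captureForts
  have h1 := captureFortsGo_eq_absGo forts [] 0 (-1) none (Or.inl ⟨rfl, rfl⟩)
  simp only [List.nil_append, List.length_nil, Nat.cast_zero] at h1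
  rw [h1, absGo_none_eq_refScan forts 0, refScan_eq_tfold forts 0 0 le_rfl]
  show tfold (grp 0 0 forts) 0 = captureForts_alt forts
  rw [← rleAlt_eq_grp]
  rfl
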